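-- pv_equiv track=rewrite | github.com/pabloschwarzenberg/grader | tema4_ej3/tema4_ej3_ce0dd21327515de533938fbe6e51268e.py | traducir_jerigonzo
-- ===== SOURCE A (Python) =====
-- def traducir_jerigonzo(texto):
--     resultado = ""
--     vocales = "aeiouAEIOU"
--
--     for letra in texto:
--         resultado += letra
--         if letra in vocales:
--             resultado += "p" + letra.lower()
--     return resultado
-- ===== SOURCE B (Python) =====
-- def traducir_jerigonzo(texto):
--     # lowercase vowels first, so the lowercase vowel inserted by an
--     # uppercase replacement is never reprocessed
--     for v in "aeiouAEIOU":
--         texto = texto.replace(v, v + "p" + v.lower())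
--     return texto
-- ===== Notes on version B (the rewrite author's own statement) =====
-- stated objective: idiomatic
-- what changed: Replaces A's character-by-character accumulation loop with ten whole-string str.replace passes, one per vowel (lowercase vowels first so the lowercase vowel inserted after an uppercase one is never reprocessed).
import Mathlib
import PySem

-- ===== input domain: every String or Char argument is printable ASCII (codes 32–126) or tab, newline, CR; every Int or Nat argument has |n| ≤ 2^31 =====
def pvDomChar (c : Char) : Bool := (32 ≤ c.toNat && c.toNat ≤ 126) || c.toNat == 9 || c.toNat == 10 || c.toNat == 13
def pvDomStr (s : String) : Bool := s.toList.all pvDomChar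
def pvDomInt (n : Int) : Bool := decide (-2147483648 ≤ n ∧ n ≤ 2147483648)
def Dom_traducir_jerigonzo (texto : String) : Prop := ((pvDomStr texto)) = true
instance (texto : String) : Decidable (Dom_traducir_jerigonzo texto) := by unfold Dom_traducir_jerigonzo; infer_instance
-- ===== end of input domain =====

-- B replaces A's char-by-char accumulation with ten sequential str.replace passes
-- (lowercase vowels before uppercase); objective: idiomatic. Equal on all inputs.

-- the string constant "aeiouAEIOU", as its character list
def pvVocales : List Char := ['a', 'e', 'i', 'o', 'u', 'A', 'E', 'I', 'O', 'U']

-- ===== PORT A =====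
-- A: build 'resultado' char by char, appending "p"+letra.lower() after each vowel.
def traducir_jerigonzo (texto : String) : String :=
  String.ofList <|
    texto.toList.foldl (fun resultado letra =>
      let r := resultado ++ [letra]
      if pvVocales.contains letra then
        r ++ ('p' :: [PySem.Chars.lowerChar letra])
      else r) []

-- ===== PORT B =====
-- B: for v in "aeiouAEIOU": texto = texto.replace(v, v + "p" + v.lower())
def traducir_jerigonzo_alt (texto : String) : String :=
  pvVocales.foldl
    (fun t v => PySem.Str.replace t (String.ofList [v])
      (String.ofList [v, 'p', PySem.Chars.lowerChar v])) texto

-- ===== PRECONDITION & SPEC =====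
def Spec_traducir_jerigonzo (texto : String) (out : String) : Prop := out = traducir_jerigonzo_alt texto
instance (texto : String) (out : String) : Decidable (Spec_traducir_jerigonzo texto out) := by unfold Spec_traducir_jerigonzo; infer_instance

-- ===== CLAIM (what is proved, stated in full; the proofs are below) =====
def Claim_equal_traducir_jerigonzo : Prop := ∀ (texto : String), Dom_traducir_jerigonzo texto → Spec_traducir_jerigonzo texto (traducir_jerigonzo texto)

-- ===== LEMMAS AND PROOFS =====

-- single-char expansion performed by one replace pass of B
def pvE (v : Char) (nw : List Char) (c : Char) : List Char := if v = c then nw else [c]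

-- the expansion A performs on each character
def pvExpand (c : Char) : List Char :=
  if pvVocales.contains c then [c, 'p', PySem.Chars.lowerChar c] else [c]

theorem pv_go_single (v : Char) (nw : List Char) :
    ∀ (l acc : List Char) (fuel : Nat), l.length ≤ fuel →
      PySem.Chars.replace.go [v] nw fuel l acc = acc.reverse ++ l.flatMap (pvE v nw) := by
  intro l
  induction l with
  | nil =>
    intro acc fuel _
    cases fuel <;> simp [PySem.Chars.replace.go]
  | cons c t ih =>
    intro acc fuel hf
    cases fuel with
    | zero => simp at hf
    | succ n =>
      by_cases hv : v = c
      · subst hv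
        have hpre : List.isPrefixOf [v] (v :: t) = true := by
          simp [List.isPrefixOf]
        rw [PySem.Chars.replace.go, if_pos hpre]
        have hdrop : List.drop [v].length (v :: t) = t := rfl
        rw [hdrop]
        simp only [List.length_cons] at hf
        rw [ih (nw.reverse ++ acc) n (by omega)]
        simp [pvE]
      · have hpre : List.isPrefixOf [v] (c :: t) = false := by
          simp [List.isPrefixOf, hv]
        rw [PySem.Chars.replace.go, if_neg (by simp [hpre])]
        simp only [List.length_cons] at hf
        rw [ih (c :: acc) n (by omega)]
        simp [pvE, hv]

theorem pv_replace_single (l : List Char) (v : Char) (nw : List Char) :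
    PySem.Chars.replace l [v] nw = l.flatMap (pvE v nw) := by
  rw [PySem.Chars.replace]
  simp only [List.isEmpty_cons, if_false, Bool.false_eq_true]
  exact pv_go_single v nw l [] l.length le_rfl

-- the list-level step of one replace pass of B
def pvStep (l : List Char) (v : Char) : List Char :=
  l.flatMap (pvE v [v, 'p', PySem.Chars.lowerChar v])

theorem pv_alt_toList (vs : List Char) (t : String) :
    (vs.foldl (fun t v => PySem.Str.replace t (String.ofList [v])
        (String.ofList [v, 'p', PySem.Chars.lowerChar v])) t).toList
      = vs.foldl pvStep t.toList := by
  induction vs generalizing t with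
  | nil => rfl
  | cons v vs ih =>
    simp only [List.foldl_cons]
    rw [ih]
    congr 1
    show (PySem.Str.replace t _ _).toList = pvStep t.toList v
    rw [PySem.Str.replace]
    simp [pvStep, pv_replace_single]

theorem pv_fold_append (vs l₁ l₂ : List Char) :
    vs.foldl pvStep (l₁ ++ l₂) = vs.foldl pvStep l₁ ++ vs.foldl pvStep l₂ := by
  induction vs generalizing l₁ l₂ with
  | nil => rfl
  | cons v vs ih =>
    simp only [List.foldl_cons, pvStep, List.flatMap_append]
    exact ih _ _

theorem pv_fold_flatMap (vs l : List Char) :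
    vs.foldl pvStep l = l.flatMap (fun c => vs.foldl pvStep [c]) := by
  induction l with
  | nil => induction vs with
    | nil => rfl
    | cons v vs ih => simpa [pvStep] using ih
  | cons c t ih =>
    have : (c :: t) = [c] ++ t := rfl
    rw [this, pv_fold_append, ih]
    simp

theorem pv_single_char (c : Char) :
    pvVocales.foldl pvStep [c] = pvExpand c := by
  by_cases h1 : c = 'a'; · subst h1; rfl
  by_cases h2 : c = 'e'; · subst h2; rfl
  by_cases h3 : c = 'i'; · subst h3; rfl
  by_cases h4 : c = 'o'; · subst h4; rfl
  by_cases h5 : c = 'u'; · subst h5; rfl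
  by_cases h6 : c = 'A'; · subst h6; rfl
  by_cases h7 : c = 'E'; · subst h7; rfl
  by_cases h8 : c = 'I'; · subst h8; rfl
  by_cases h9 : c = 'O'; · subst h9; rfl
  by_cases h10 : c = 'U'; · subst h10; rfl
  have hmem : c ∉ pvVocales := by
    simp only [pvVocales, List.mem_cons, List.not_mem_nil, or_false]
    push Not
    exact ⟨h1, h2, h3, h4, h5, h6, h7, h8, h9, h10⟩
  have hstep : ∀ v ∈ pvVocales, pvStep [c] v = [c] := by
    intro v hv
    have hne : v ≠ c := fun hvc => hmem (hvc ▸ hv)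
    simp [pvStep, pvE, hne]
  have hfold : ∀ vs : List Char, (∀ v ∈ vs, pvStep [c] v = [c]) → vs.foldl pvStep [c] = [c] := by
    intro vs
    induction vs with
    | nil => intro _; rfl
    | cons v vs ih =>
      intro h
      simp only [List.foldl_cons, h v (by simp)]
      exact ih (fun w hw => h w (by simp [hw]))
  rw [hfold pvVocales hstep]
  rw [pvExpand, if_neg (by simp only [List.contains_eq_mem, decide_eq_true_eq]; exact hmem)]

theorem pv_A_fold (l acc : List Char) :
    l.foldl (fun resultado letra =>
        let r := resultado ++ [letra]
        if pvVocales.contains letra then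
          r ++ ('p' :: [PySem.Chars.lowerChar letra])
        else r) acc
      = acc ++ l.flatMap pvExpand := by
  induction l generalizing acc with
  | nil => simp
  | cons c t ih =>
    simp only [List.foldl_cons]
    by_cases h : pvVocales.contains c = true
    · rw [if_pos h, ih]
      simp only [List.flatMap_cons, pvExpand, h, if_true]
      simp
    · rw [if_neg h, ih]
      simp only [Bool.not_eq_true] at h
      simp only [List.flatMap_cons, pvExpand, h, Bool.false_eq_true, if_false]
      simp

-- ===== VERDICT (by name: the statement is the Claim_ definition above) =====
theorem traducir_jerigonzo_spec : Claim_equal_traducir_jerigonzo := by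
  intro texto _
  show traducir_jerigonzo texto = traducir_jerigonzo_alt texto
  have hB : (traducir_jerigonzo_alt texto).toList
      = texto.toList.flatMap pvExpand := by
    have hfun : (fun c => pvVocales.foldl pvStep [c]) = pvExpand := funext pv_single_char
    rw [traducir_jerigonzo_alt, pv_alt_toList, pv_fold_flatMap, hfun]
  have hA : traducir_jerigonzo texto
      = String.ofList (texto.toList.flatMap pvExpand) := by
    rw [traducir_jerigonzo, pv_A_fold, List.nil_append]
  rw [hA, ← hB, String.ofList_toList]
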